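-- pv_equiv track=rewrite | github.com/anathegrey/delivery-game | deliverygame.py | PF_total_cost
-- ===== SOURCE A (Python) =====
-- def PF_total_cost(total_deliveries):
--     num_delivery = 0
--     i = 1
--     for i in range(total_deliveries+1):
--         if i <= 10:
--             num_delivery = num_delivery + i * 1
--         elif i > 10:
--             num_delivery = num_delivery + i * 2
--     return num_delivery
-- ===== SOURCE B (Python) =====
-- def PF_total_cost(total_deliveries):
--     n = total_deliveries
--     if n < 0:
--         return 0
--     if n <= 10:
--         return n * (n + 1) // 2
--     return n * (n + 1) - 55
-- ===== Notes on version B (the rewrite author's own statement) =====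
-- stated objective: faster
-- what changed: Replaced the O(n) loop over range(n+1) with an O(1) closed-form computation: a triangular-number formula on the low segment and an arithmetic-series formula on the doubled segment.
import Mathlib
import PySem

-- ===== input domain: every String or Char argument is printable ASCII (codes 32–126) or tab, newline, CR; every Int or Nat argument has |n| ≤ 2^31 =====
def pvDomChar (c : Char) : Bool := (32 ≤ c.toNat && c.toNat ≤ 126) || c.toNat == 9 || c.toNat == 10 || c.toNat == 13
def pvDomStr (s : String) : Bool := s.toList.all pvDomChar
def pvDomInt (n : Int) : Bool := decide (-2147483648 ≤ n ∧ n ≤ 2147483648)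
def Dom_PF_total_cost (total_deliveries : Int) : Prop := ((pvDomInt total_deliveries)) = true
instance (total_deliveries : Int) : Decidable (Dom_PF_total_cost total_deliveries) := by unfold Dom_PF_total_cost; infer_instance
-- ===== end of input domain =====

-- ===== PORT A =====
-- Literal port of A: fold over range(total_deliveries+1) with the two branches.
def PF_total_cost (total_deliveries : Int) : Int :=
  (PySem.List.pyRange 0 (total_deliveries + 1) 1).foldl
    (fun num_delivery i =>
      if i ≤ 10 then num_delivery + i * 1
      else if i > 10 then num_delivery + i * 2
      else num_delivery) 0

-- ===== PORT B =====
-- Port of B: closed form, O(1). '//' ported as PySem.Int.floordiv.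
def PF_total_cost_alt (total_deliveries : Int) : Int :=
  if total_deliveries < 0 then 0
  else if total_deliveries ≤ 10 then PySem.Int.floordiv (total_deliveries * (total_deliveries + 1)) 2
  else total_deliveries * (total_deliveries + 1) - 55

-- ===== PRECONDITION & SPEC =====
def Spec_PF_total_cost (total_deliveries : Int) (out : Int) : Prop := out = PF_total_cost_alt total_deliveries
instance (total_deliveries : Int) (out : Int) : Decidable (Spec_PF_total_cost total_deliveries out) := by unfold Spec_PF_total_cost; infer_instance

-- ===== CLAIM (what is proved, stated in full; the proofs are below) =====
def Claim_equal_PF_total_cost : Prop := ∀ (total_deliveries : Int), Dom_PF_total_cost total_deliveries → Spec_PF_total_cost total_deliveries (PF_total_cost total_deliveries)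

-- ===== LEMMAS AND PROOFS =====

-- ===== VERDICT (by name: the statement is the Claim_ definition above) =====
-- A on 11+k, proved by peeling the last range element.
theorem PF_A_big (k : Nat) : PF_total_cost (11 + k) = (11 + (k : Int)) * (12 + k) - 55 := by
  induction k with
  | zero => decide
  | succ k ih =>
      have h : ((11 : Int) + (k + 1 : Nat)) + 1 = ((11 + (k : Int)) + 1) + 1 := by push_cast; ring
      unfold PF_total_cost at *
      rw [h, PySem.List.pyRange_one_succ_right (by omega), List.foldl_append]
      simp only [List.foldl]
      rw [if_neg (by omega), if_pos (by omega)]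
      rw [ih]
      push_cast
      ring

theorem PF_total_cost_spec : Claim_equal_PF_total_cost := by
  intro n _
  unfold Spec_PF_total_cost PF_total_cost_alt
  rcases lt_or_ge n 0 with hneg | hpos
  · rw [if_pos hneg]
    unfold PF_total_cost
    rw [PySem.List.pyRange_one_eq_nil (by omega)]
    rfl
  · rcases le_or_gt n 10 with hle | hgt
    · rw [if_neg (by omega), if_pos hle]
      interval_cases n <;> decide
    · rw [if_neg (by omega), if_neg (by omega)]
      obtain ⟨k, rfl⟩ : ∃ k : Nat, n = 11 + k := ⟨(n - 11).toNat, by omega⟩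
      rw [PF_A_big]
      push_cast
      ring
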